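-- pv_equiv track=rewrite | github.com/hscspring/The-DataStructure-and-Algorithms | CodingInterview2-Python/19_RegularExpressionsMatching/regular_expressions.py | match_recursion
-- ===== SOURCE A (Python) =====
-- def match_recursion(string: str, pattern: str) -> bool:
--     if not string and not pattern:
--         return True
--     if not pattern and string:
--         return False
--
--     first_match = string and (string[0] == pattern[0] or pattern[0] == ".")
--
--     if len(pattern) > 1 and pattern[1] == "*":
--         if first_match:
--             # one time, two times, zero time
--             return (match_recursion(string[1:], pattern[2:]) or
--                     match_recursion(string[1:], pattern) or
--                     match_recursion(string, pattern[2:]))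
--         else:
--             return match_recursion(string, pattern[2:])
--
--     if first_match:
--         return match_recursion(string[1:], pattern[1:])
--
--     return False
-- ===== SOURCE B (Python) =====
-- def _empty_row(pattern):
--     # row[j] = does the empty string match pattern[j:]; built right-to-left
--     m = len(pattern)
--     acc = [True]  # values for j = m, m-1, ... in reverse order
--     for j in range(m - 1, -1, -1):
--         star = j + 1 < m and pattern[j + 1] == '*'
--         acc.append(star and acc[-2])
--     acc.reverse()
--     return acc
--
-- def _step_row(ch, pattern, prev):
--     # given prev[j] = match(tail, pattern[j:]), return row with row[j] = match(ch + tail, pattern[j:])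
--     m = len(pattern)
--     acc = [False]  # values for j = m, m-1, ... in reverse order
--     for j in range(m - 1, -1, -1):
--         first = pattern[j] == '.' or pattern[j] == ch
--         if j + 1 < m and pattern[j + 1] == '*':
--             v = acc[-2] or (first and prev[j])
--         else:
--             v = first and prev[j + 1]
--         acc.append(v)
--     acc.reverse()
--     return acc
--
-- def match_recursion(string: str, pattern: str) -> bool:
--     # bottom-up DP over suffixes: one row per string suffix
--     row = _empty_row(pattern)
--     for ch in reversed(string):
--         row = _step_row(ch, pattern, row)
--     return row[0]
-- ===== Notes on version B (the rewrite author's own statement) =====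
-- stated objective: alternative
-- what changed: Replaced A's three-way recursion on (string, pattern) suffix pairs by a bottom-up dynamic program that builds, for each string suffix, the row of match results over all pattern suffixes (each subproblem computed once).
import Mathlib
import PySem

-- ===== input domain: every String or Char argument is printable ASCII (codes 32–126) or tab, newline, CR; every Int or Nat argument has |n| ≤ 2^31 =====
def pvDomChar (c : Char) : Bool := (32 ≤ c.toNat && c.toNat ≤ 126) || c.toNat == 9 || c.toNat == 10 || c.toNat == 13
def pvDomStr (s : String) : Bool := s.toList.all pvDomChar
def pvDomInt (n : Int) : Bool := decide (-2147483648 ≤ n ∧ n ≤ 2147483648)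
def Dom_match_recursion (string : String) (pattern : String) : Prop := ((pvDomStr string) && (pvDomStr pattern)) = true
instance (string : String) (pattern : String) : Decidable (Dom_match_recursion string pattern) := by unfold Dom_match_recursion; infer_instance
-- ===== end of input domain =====

-- B (objective: alternative) replaces A's three-way recursion on suffix pairs by a bottom-up DP over pattern-suffix rows.

-- ===== PORT A =====
-- A's recursion on (string, pattern); `first_match = string and (...)` forces the
-- case split on the string being nonempty inside each pattern branch.
def mrecA : List Char → List Char → Bool
  | [], [] => true
  | _ :: _, [] => false
  | s, p0 :: prest =>
    match prest with
    | '*' :: p2 =>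
      match s with
      | [] => mrecA [] p2                       -- first_match falsy: zero occurrences
      | c :: srest =>
        if c == p0 || p0 == '.' then
          -- one time, two times, zero time
          mrecA srest p2 || mrecA srest (p0 :: '*' :: p2) || mrecA (c :: srest) p2
        else mrecA (c :: srest) p2
    | px =>
      match s with
      | [] => false
      | c :: srest => if c == p0 || p0 == '.' then mrecA srest px else false
  termination_by s p => s.length + p.length
  decreasing_by all_goals (simp only [List.length_cons, List.length_nil]; omega)

def match_recursion (string : String) (pattern : String) : Bool :=
  mrecA string.toList pattern.toList

-- ===== PORT B =====
-- row[k] = does the empty string match ps[k:], for every suffix index k of ps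
def emptyRow : List Char → List Bool
  | [] => [true]
  | _ :: rest =>
    let r := emptyRow rest
    (match rest with
     | '*' :: _ => r.getD 1 false
     | _ => false) :: r

-- given prev[k] = match(tail, ps[k:]), return row[k] = match(ch :: tail, ps[k:])
def stepRow (ch : Char) : List Char → List Bool → List Bool
  | [], _ => [false]
  | p0 :: rest, prev =>
    let r := stepRow ch rest prev.tail
    let first := p0 == '.' || p0 == ch
    (match rest with
     | '*' :: _ => r.getD 1 false || (first && prev.getD 0 false)
     | _ => first && prev.getD 1 false) :: r

def match_recursion_alt (string : String) (pattern : String) : Bool :=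
  (string.toList.foldr (fun ch prev => stepRow ch pattern.toList prev)
      (emptyRow pattern.toList)).getD 0 false

-- ===== PRECONDITION & SPEC =====
def Spec_match_recursion (string : String) (pattern : String) (out : Bool) : Prop := out = match_recursion_alt string pattern
instance (string : String) (pattern : String) (out : Bool) : Decidable (Spec_match_recursion string pattern out) := by unfold Spec_match_recursion; infer_instance

-- ===== CLAIM (what is proved, stated in full; the proofs are below) =====
def Claim_equal_match_recursion : Prop := ∀ (string : String) (pattern : String), Dom_match_recursion string pattern → Spec_match_recursion string pattern (match_recursion string pattern)

-- ===== LEMMAS AND PROOFS =====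

-- the intended meaning of a DP row: mrecA applied to every suffix of the pattern
def rowSpec (sl : List Char) (ps : List Char) : List Bool :=
  ps.tails.map (fun q => mrecA sl q)

theorem rowSpec_nil (sl : List Char) : rowSpec sl [] = [mrecA sl []] := by
  simp [rowSpec]

theorem rowSpec_cons (sl : List Char) (c : Char) (rest : List Char) :
    rowSpec sl (c :: rest) = mrecA sl (c :: rest) :: rowSpec sl rest := by
  simp [rowSpec]

theorem rowSpec_getD0 (sl ps : List Char) :
    (rowSpec sl ps).getD 0 false = mrecA sl ps := by
  cases ps <;> simp [rowSpec_nil, rowSpec_cons]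

-- unfolding equations of mrecA in the shapes the proof needs
theorem mrecA_nil_star (p0 : Char) (p2 : List Char) :
    mrecA [] (p0 :: '*' :: p2) = mrecA [] p2 := by
  simp [mrecA]

theorem mrecA_cons_star (c p0 : Char) (sl p2 : List Char) :
    mrecA (c :: sl) (p0 :: '*' :: p2) =
      if c == p0 || p0 == '.' then
        mrecA sl p2 || mrecA sl (p0 :: '*' :: p2) || mrecA (c :: sl) p2
      else mrecA (c :: sl) p2 := by
  simp [mrecA]

theorem mrecA_nil_nonstar (p0 : Char) (prest : List Char)
    (h : ∀ p2, prest ≠ '*' :: p2) : mrecA [] (p0 :: prest) = false := by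
  simp only [mrecA]

theorem mrecA_cons_nonstar (c p0 : Char) (sl prest : List Char)
    (h : ∀ p2, prest ≠ '*' :: p2) :
    mrecA (c :: sl) (p0 :: prest) =
      if c == p0 || p0 == '.' then mrecA sl prest else false := by
  simp only [mrecA]

-- zero occurrences of a starred atom may always be taken
theorem mrecA_star_zero (sl p2 : List Char) (p0 : Char) (h : mrecA sl p2 = true) :
    mrecA sl (p0 :: '*' :: p2) = true := by
  cases sl with
  | nil => rw [mrecA_nil_star]; exact h
  | cons c srest =>
    rw [mrecA_cons_star]
    split <;> simp [h]

theorem first_comm (ch p0 : Char) :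
    (ch == p0 || p0 == '.') = (p0 == '.' || p0 == ch) := by
  by_cases h : ch = p0
  · subst h; rw [Bool.or_comm]
  · have h1 : (ch == p0) = false := by simp [h]
    have h2 : (p0 == ch) = false := by simp [Ne.symm h]
    rw [h1, h2, Bool.false_or, Bool.or_false]

theorem emptyRow_eq (ps : List Char) : emptyRow ps = rowSpec [] ps := by
  induction ps with
  | nil =>
    rw [rowSpec_nil, show mrecA [] [] = true from by simp [mrecA]]
    rfl
  | cons c rest ih =>
    rw [rowSpec_cons]
    simp only [emptyRow, ih]
    congr 1
    cases rest with
    | nil =>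
      rw [mrecA_nil_nonstar c [] (fun p2 h => by cases h)]
    | cons c1 r1 =>
      by_cases hstar : c1 = '*'
      · subst hstar
        rw [mrecA_nil_star, rowSpec_cons]
        show (rowSpec [] r1).getD 0 false = mrecA [] r1
        exact rowSpec_getD0 [] r1
      · rw [mrecA_nil_nonstar c (c1 :: r1)
          (fun p2 h => hstar (List.cons_eq_cons.mp h).1)]
        split
        · rename_i tail heq; injection heq with h1 _; exact absurd h1 hstar
        · rfl

theorem stepRow_eq (ch : Char) (sl : List Char) (ps : List Char) :
    stepRow ch ps (rowSpec sl ps) = rowSpec (ch :: sl) ps := by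
  induction ps with
  | nil =>
    rw [rowSpec_nil, rowSpec_nil, show mrecA (ch :: sl) [] = false from by simp [mrecA]]
    rfl
  | cons p0 rest ih =>
    rw [rowSpec_cons sl p0 rest]
    simp only [stepRow, List.tail_cons, List.getD_cons_zero, List.getD_cons_succ]
    rw [ih, rowSpec_cons (ch :: sl) p0 rest]
    congr 1
    cases rest with
    | nil =>
      rw [rowSpec_getD0 sl [],
        mrecA_cons_nonstar ch p0 sl [] (fun p2 h => by cases h), first_comm]
      cases (p0 == '.' || p0 == ch) <;> simp
    | cons c1 r1 =>
      by_cases hstar : c1 = '*'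
      · subst hstar
        rw [rowSpec_cons (ch :: sl) '*' r1]
        show ((rowSpec (ch :: sl) r1).getD 0 false
              || ((p0 == '.' || p0 == ch) && mrecA sl (p0 :: '*' :: r1)))
            = mrecA (ch :: sl) (p0 :: '*' :: r1)
        rw [rowSpec_getD0, mrecA_cons_star ch p0 sl r1, first_comm]
        cases hfb : (p0 == '.' || p0 == ch) with
        | false => simp
        | true =>
          rw [Bool.true_and, if_pos rfl]
          cases hz : mrecA sl r1 with
          | true => simp [mrecA_star_zero sl r1 p0 hz]
          | false =>
            cases mrecA (ch :: sl) r1 <;> cases mrecA sl (p0 :: '*' :: r1) <;> simp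
      · have hne : ∀ p2, (c1 :: r1 : List Char) ≠ '*' :: p2 :=
          fun p2 h => hstar (List.cons_eq_cons.mp h).1
        rw [mrecA_cons_nonstar ch p0 sl (c1 :: r1) hne, first_comm]
        split
        · rename_i tail heq; injection heq with h1 _; exact absurd h1 hstar
        · rw [rowSpec_getD0 sl (c1 :: r1)]
          cases (p0 == '.' || p0 == ch) <;> simp

theorem fold_rows (sl pl : List Char) :
    sl.foldr (fun ch prev => stepRow ch pl prev) (emptyRow pl) = rowSpec sl pl := by
  induction sl with
  | nil => exact emptyRow_eq pl
  | cons ch sl ih => simp only [List.foldr, ih, stepRow_eq]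

-- ===== VERDICT (by name: the statement is the Claim_ definition above) =====
theorem match_recursion_spec : Claim_equal_match_recursion := by
  intro s p _
  unfold Spec_match_recursion match_recursion match_recursion_alt
  rw [fold_rows, rowSpec_getD0]
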